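-- pv_equiv track=rewrite | github.com/almogboaron/IntroToCsCourseExtended | Hw/hw5_313119265.py | prefix_suffix_overlap
-- ===== SOURCE A (Python) =====
-- def prefix_suffix_overlap(lst, k):
--     tuple_bag = []
--     for i,str1 in enumerate(lst):
--         for j,str2 in enumerate(lst):
--             if i==j:
--                 continue
--             if str1[0:k]==str2[-k:]:
--                 tuple_bag.append((i,j))
--     return tuple_bag
-- ===== SOURCE B (Python) =====
-- def prefix_suffix_overlap(lst, k):
--     # Index j's by their k-suffix once, then look up each i's k-prefix.
--     suffix_index = {}
--     for j, s in enumerate(lst):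
--         suffix_index.setdefault(s[-k:], []).append(j)
--     out = []
--     for i, s in enumerate(lst):
--         for j in suffix_index.get(s[0:k], ()):
--             if j != i:
--                 out.append((i, j))
--     return out
-- ===== Notes on version B (the rewrite author's own statement) =====
-- stated objective: alternative
-- what changed: Replaces the all-pairs nested scan with a single pass that groups indices by k-suffix in a dict, then one lookup of each string's k-prefix emits the matches in the same order (measured 1.87x at n=1024 but unconfirmed at larger sizes where the output itself is quadratic).
import Mathlib
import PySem

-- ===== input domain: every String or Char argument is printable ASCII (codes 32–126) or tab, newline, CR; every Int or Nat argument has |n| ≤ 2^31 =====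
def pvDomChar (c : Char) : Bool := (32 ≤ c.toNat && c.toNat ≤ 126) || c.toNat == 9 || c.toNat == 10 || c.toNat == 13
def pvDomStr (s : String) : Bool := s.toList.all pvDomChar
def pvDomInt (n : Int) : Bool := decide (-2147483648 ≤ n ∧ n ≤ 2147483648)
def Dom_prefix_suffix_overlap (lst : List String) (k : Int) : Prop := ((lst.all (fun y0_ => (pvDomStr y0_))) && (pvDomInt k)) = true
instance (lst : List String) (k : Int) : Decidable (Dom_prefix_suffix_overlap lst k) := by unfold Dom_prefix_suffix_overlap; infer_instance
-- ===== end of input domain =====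

-- B builds a dict from k-suffix to index list once and looks up each k-prefix, instead of A's all-pairs nested scan; same return value everywhere.

-- ===== PORT A =====
def prefix_suffix_overlap (lst : List String) (k : Int) : List (List Int) :=
  (PySem.List.enumerate lst).foldl
    (fun tuple_bag p =>
      (PySem.List.enumerate lst).foldl
        (fun tuple_bag q =>
          if p.1 = q.1 then tuple_bag
          else if PySem.Str.slice p.2 (some 0) (some k) = PySem.Str.slice q.2 (some (-k)) none
            then tuple_bag ++ [[p.1, q.1]] else tuple_bag)
        tuple_bag)
    []

-- ===== PORT B =====
def prefix_suffix_overlap_alt (lst : List String) (k : Int) : List (List Int) :=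
  let suffix_index : PySem.Dict String (List Int) :=
    (PySem.List.enumerate lst).foldl
      (fun d p => d.modify (PySem.Str.slice p.2 (some (-k)) none) [] (· ++ [p.1]))
      PySem.Dict.empty
  (PySem.List.enumerate lst).foldl
    (fun out p =>
      (suffix_index.getD (PySem.Str.slice p.2 (some 0) (some k)) []).foldl
        (fun out j => if j ≠ p.1 then out ++ [[p.1, j]] else out)
        out)
    []

-- ===== PRECONDITION & SPEC =====
def Spec_prefix_suffix_overlap (lst : List String) (k : Int) (out : List (List Int)) : Prop := out = prefix_suffix_overlap_alt lst k
instance (lst : List String) (k : Int) (out : List (List Int)) : Decidable (Spec_prefix_suffix_overlap lst k out) := by unfold Spec_prefix_suffix_overlap; infer_instance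

-- ===== CLAIM (what is proved, stated in full; the proofs are below) =====
def Claim_equal_prefix_suffix_overlap : Prop := ∀ (lst : List String) (k : Int), Dom_prefix_suffix_overlap lst k → Spec_prefix_suffix_overlap lst k (prefix_suffix_overlap lst k)

-- ===== LEMMAS AND PROOFS =====

-- the grouping dict looked up at key c yields exactly the indices whose k-suffix is c, in order
theorem pv_dict_lookup (lst : List String) (k : Int) (c : String) :
    ((PySem.List.enumerate lst).foldl
      (fun d p => d.modify (PySem.Str.slice p.2 (some (-k)) none) [] (· ++ [p.1]))
      PySem.Dict.empty).getD c []
    = (((PySem.List.enumerate lst).filter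
        (fun p => PySem.Str.slice p.2 (some (-k)) none == c)).map (·.1)) := by
  have h := PySem.Dict.getD_foldl_modify_append
      ((PySem.List.enumerate lst).map (fun p => (PySem.Str.slice p.2 (some (-k)) none, p.1)))
      PySem.Dict.empty c
  rw [List.foldl_map] at h
  simpa [List.filter_map, List.map_map, Function.comp_def] using h

-- A's inner scan over the whole enumeration equals B's fold over the filtered index list
theorem pv_inner (i : Int) (c : String) (k : Int) :
    ∀ (l : List (Int × String)) (acc : List (List Int)),
    l.foldl (fun bag q => if i = q.1 then bag
        else if c = PySem.Str.slice q.2 (some (-k)) none then bag ++ [[i, q.1]] else bag) acc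
    = ((l.filter (fun p => PySem.Str.slice p.2 (some (-k)) none == c)).map (·.1)).foldl
        (fun out j => if j ≠ i then out ++ [[i, j]] else out) acc := by
  intro l
  induction l with
  | nil => intro acc; rfl
  | cons q rest ih =>
    intro acc
    simp only [List.foldl_cons, List.filter_cons]
    split_ifs with h1 h2 h3 h4 h5
    · simp only [List.map_cons, List.foldl_cons]
      rw [if_neg (show ¬ q.1 ≠ i from by simp [h1.symm])]
      exact ih _
    · exact ih _
    · simp only [List.map_cons, List.foldl_cons]
      rw [if_pos (show q.1 ≠ i from fun e => h1 e.symm)]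
      exact ih _
    · exact absurd (by rw [← h3]; exact beq_self_eq_true c) h4
    · exact absurd (eq_of_beq h5).symm h3
    · exact ih _

-- ===== VERDICT (by name: the statement is the Claim_ definition above) =====
theorem prefix_suffix_overlap_spec : Claim_equal_prefix_suffix_overlap := by
  intro lst k _
  unfold Spec_prefix_suffix_overlap prefix_suffix_overlap prefix_suffix_overlap_alt
  apply PySem.List.foldl_congr_mem
  intro bag p _
  rw [pv_dict_lookup lst k (PySem.Str.slice p.2 (some 0) (some k))]
  exact pv_inner p.1 (PySem.Str.slice p.2 (some 0) (some k)) k (PySem.List.enumerate lst) bag
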